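-- pv_equiv track=rewrite | github.com/abderoofyt/code | Python/Automation/solving/LCM-HCF.py | step_by_step_hcf
-- ===== SOURCE A (Python) =====
-- def step_by_step_hcf(a, b):
--     """
--     Finds the HCF of two numbers and provides step-by-step working out.
--     """
--     steps = []
--     steps.append(f"Finding the Highest Common Factor (HCF) of {a} and {b}:")
--
--     while b:
--         steps.append(f"Dividing {a} by {b}:")
--         steps.append(f"{a} = {b} * ({a // b}) + {a % b}")
--         a, b = b, a % b
--
--     steps.append(f"The Highest Common Factor (HCF) is {a}.")
--     return a, steps
-- ===== SOURCE B (Python) =====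
-- def step_by_step_hcf(a, b):
--     """HCF with step-by-step working, in two stages: first compute the
--     Euclidean chain of (dividend, divisor) pairs recursively, then render
--     the whole log from that chain in one formatting pass."""
--     def chain(x, y):
--         if not y:
--             return x, []
--         g, rest = chain(y, x % y)
--         return g, [(x, y)] + rest
--     g, pairs = chain(a, b)
--     steps = ([f"Finding the Highest Common Factor (HCF) of {a} and {b}:"]
--              + [line for (x, y) in pairs
--                 for line in (f"Dividing {x} by {y}:",
--                              f"{x} = {y} * ({x // y}) + {x % y}")]
--              + [f"The Highest Common Factor (HCF) is {g}."])
--     return g, steps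
-- ===== Notes on version B (the rewrite author's own statement) =====
-- stated objective: alternative
-- what changed: Replaces the single while-loop that mutates (a,b) and appends formatted lines to a shared list with a two-stage design: a recursive helper first produces the pure Euclidean chain of (dividend,divisor) pairs and the HCF, and a separate formatting pass renders the entire log (header, two lines per pair, final line) from that chain.
import Mathlib
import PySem

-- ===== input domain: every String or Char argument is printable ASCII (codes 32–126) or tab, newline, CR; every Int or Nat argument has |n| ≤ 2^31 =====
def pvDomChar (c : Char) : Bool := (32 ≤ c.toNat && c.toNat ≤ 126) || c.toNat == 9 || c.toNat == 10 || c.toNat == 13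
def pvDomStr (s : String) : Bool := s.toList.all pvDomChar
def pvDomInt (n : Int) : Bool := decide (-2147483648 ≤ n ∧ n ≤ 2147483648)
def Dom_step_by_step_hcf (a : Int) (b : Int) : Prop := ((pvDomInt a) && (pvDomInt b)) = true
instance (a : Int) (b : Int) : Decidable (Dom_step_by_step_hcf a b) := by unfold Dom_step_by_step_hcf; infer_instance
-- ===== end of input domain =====

-- B is an alternative decomposition of A's while-loop-with-log: it first computes the
-- Euclidean chain of (dividend, divisor) pairs, then formats the whole log in one pass.

-- shared f-string builders (identical literal text in both Python versions)
def hcfHeader (a b : Int) : String :=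
  "Finding the Highest Common Factor (HCF) of " ++ PySem.Int.toStr a ++ " and " ++ PySem.Int.toStr b ++ ":"
def hcfDivLine (a b : Int) : String :=
  "Dividing " ++ PySem.Int.toStr a ++ " by " ++ PySem.Int.toStr b ++ ":"
def hcfEqLine (a b : Int) : String :=
  PySem.Int.toStr a ++ " = " ++ PySem.Int.toStr b ++ " * (" ++ PySem.Int.toStr (PySem.Int.floordiv a b) ++ ") + " ++ PySem.Int.toStr (PySem.Int.mod a b)
def hcfFinal (a : Int) : String :=
  "The Highest Common Factor (HCF) is " ++ PySem.Int.toStr a ++ "."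

-- |a mod b| < |b| for b ≠ 0 (termination of both recursions)
theorem pv_mod_natAbs_lt (a b : Int) (h : b ≠ 0) :
    (PySem.Int.mod a b).natAbs < b.natAbs := by
  rcases lt_or_gt_of_ne h with hb | hb
  · have := PySem.Int.mod_neg_bounds a hb
    omega
  · have h1 := PySem.Int.mod_nonneg a hb
    have h2 := PySem.Int.mod_lt a hb
    omega

-- ===== PORT A =====
-- the 'while b:' loop, threading (a, b) and the accumulated steps list
def hcfLoopA (a b : Int) (steps : List String) : Int × List String :=
  if h : b = 0 then (a, steps)
  else hcfLoopA b (PySem.Int.mod a b) (steps ++ [hcfDivLine a b, hcfEqLine a b])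
termination_by b.natAbs
decreasing_by exact pv_mod_natAbs_lt a b h

def step_by_step_hcf (a : Int) (b : Int) : Int × List String :=
  let steps : List String := [hcfHeader a b]
  let r := hcfLoopA a b steps
  (r.1, r.2 ++ [hcfFinal r.1])

-- ===== PORT B =====
-- stage 1: the pure Euclidean chain of (dividend, divisor) pairs, plus the HCF
def hcfChain (x y : Int) : Int × List (Int × Int) :=
  if h : y = 0 then (x, [])
  else
    let r := hcfChain y (PySem.Int.mod x y)
    (r.1, (x, y) :: r.2)
termination_by y.natAbs
decreasing_by exact pv_mod_natAbs_lt x y h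

-- stage 2: render the whole log from the chain in one formatting pass
def step_by_step_hcf_alt (a : Int) (b : Int) : Int × List String :=
  let c := hcfChain a b
  (c.1,
    hcfHeader a b ::
      (c.2.flatMap (fun p => [hcfDivLine p.1 p.2, hcfEqLine p.1 p.2])
        ++ [hcfFinal c.1]))

-- ===== PRECONDITION & SPEC =====
def Spec_step_by_step_hcf (a : Int) (b : Int) (out : Int × List String) : Prop := out = step_by_step_hcf_alt a b
instance (a : Int) (b : Int) (out : Int × List String) : Decidable (Spec_step_by_step_hcf a b out) := by unfold Spec_step_by_step_hcf; infer_instance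

-- ===== CLAIM (what is proved, stated in full; the proofs are below) =====
def Claim_equal_step_by_step_hcf : Prop := ∀ (a : Int) (b : Int), Dom_step_by_step_hcf a b → Spec_step_by_step_hcf a b (step_by_step_hcf a b)

-- ===== LEMMAS AND PROOFS =====

-- A's loop, run from any accumulator, returns the chain's HCF and appends exactly
-- the rendering of the chain's pairs to the accumulator
theorem hcfLoopA_eq_chain (a b : Int) (steps : List String) :
    hcfLoopA a b steps =
      ((hcfChain a b).1,
        steps ++ (hcfChain a b).2.flatMap (fun p => [hcfDivLine p.1 p.2, hcfEqLine p.1 p.2])) := by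
  induction a, b using hcfChain.induct generalizing steps with
  | case1 a =>
    simp [hcfLoopA, hcfChain]
  | case2 a b h ih =>
    rw [hcfLoopA]; simp only [h, dif_neg, not_false_iff]
    rw [ih]
    conv_rhs => rw [hcfChain]
    simp [h]

theorem step_eq (a b : Int) : step_by_step_hcf a b = step_by_step_hcf_alt a b := by
  simp only [step_by_step_hcf, step_by_step_hcf_alt, hcfLoopA_eq_chain]
  simp

-- ===== VERDICT (by name: the statement is the Claim_ definition above) =====
theorem step_by_step_hcf_spec : Claim_equal_step_by_step_hcf := by
  intro a b _
  unfold Spec_step_by_step_hcf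
  exact step_eq a b
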